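-- pv_equiv track=rewrite | github.com/infinity-plus/tnpms-backend | backend/placement/models.py | sequential_validation
-- ===== SOURCE A (Python) =====
-- from typing import List, Tuple, Optional
--
-- def sequential_validation(arr: List[Tuple[str, bool]]) -> Optional[int]:
--     false_occured = False
--     for idx, (_, current) in enumerate(arr):
--         if not false_occured and not current:
--             false_occured = True
--         if current and false_occured:
--             return idx
--
--     return None
-- ===== SOURCE B (Python) =====
-- from typing import List, Tuple, Optional
--
-- def sequential_validation(arr: List[Tuple[str, bool]]) -> Optional[int]:
--     # Right-to-left dynamic programming: for each suffix keep
--     #   first_true = index of the first True in the suffix,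
--     #   ans       = answer of the task restricted to the suffix.
--     # A False at i starts the suffix's False-prefix, so its answer is the
--     # first True strictly after i; a True at i inherits the suffix answer.
--     first_true: Optional[int] = None
--     ans: Optional[int] = None
--     for i in range(len(arr) - 1, -1, -1):
--         if arr[i][1]:
--             first_true = i
--         else:
--             ans = first_true
--     return ans
-- ===== Notes on version B (the rewrite author's own statement) =====
-- stated objective: alternative
-- what changed: Replaces A's forward flag-carrying scan with a right-to-left dynamic programming pass that maintains, for each suffix, the first-True index and the suffix's answer, combining them back-to-front.
import Mathlib
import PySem

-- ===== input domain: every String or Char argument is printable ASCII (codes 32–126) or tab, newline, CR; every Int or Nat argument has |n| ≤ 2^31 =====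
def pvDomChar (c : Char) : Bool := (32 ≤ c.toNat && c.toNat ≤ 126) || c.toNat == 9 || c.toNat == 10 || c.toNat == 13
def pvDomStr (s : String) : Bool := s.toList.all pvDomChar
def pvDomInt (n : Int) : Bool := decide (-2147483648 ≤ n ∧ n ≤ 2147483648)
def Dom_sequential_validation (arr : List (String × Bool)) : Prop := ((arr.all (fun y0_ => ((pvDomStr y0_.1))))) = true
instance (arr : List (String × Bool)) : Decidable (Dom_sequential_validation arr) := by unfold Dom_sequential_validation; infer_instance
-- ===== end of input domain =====

-- B replaces A's forward flag-carrying scan with a right-to-left DP pass carrying (first-True index, suffix answer); same O(n) cost, different traversal.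
-- ===== PORT A =====
-- the enumerate loop with the `false_occured` flag, as structural recursion carrying (idx, flag)
def pvSeqLoop : List (String × Bool) → Int → Bool → Option Int
  | [], _, _ => none
  | (_, c) :: rest, idx, falseOccured =>
    let falseOccured' := if !falseOccured && !c then true else falseOccured
    if c && falseOccured' then some idx else pvSeqLoop rest (idx + 1) falseOccured'

def sequential_validation (arr : List (String × Bool)) : Option Int :=
  pvSeqLoop arr 0 false

-- ===== PORT B =====
-- the reversed-index loop: each element is processed after its whole suffix, so it is
-- the structural recursion returning the pair (first_true, ans) for the suffix at index i
def pvBackLoop : List (String × Bool) → Int → Option Int × Option Int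
  | [], _ => (none, none)
  | (_, c) :: rest, i =>
    let (firstTrue, ans) := pvBackLoop rest (i + 1)
    if c then (some i, ans) else (firstTrue, firstTrue)

def sequential_validation_alt (arr : List (String × Bool)) : Option Int :=
  (pvBackLoop arr 0).2

-- ===== PRECONDITION & SPEC =====
def Spec_sequential_validation (arr : List (String × Bool)) (out : Option Int) : Prop := out = sequential_validation_alt arr
instance (arr : List (String × Bool)) (out : Option Int) : Decidable (Spec_sequential_validation arr out) := by unfold Spec_sequential_validation; infer_instance

-- ===== CLAIM (what is proved, stated in full; the proofs are below) =====
def Claim_equal_sequential_validation : Prop := ∀ (arr : List (String × Bool)), Dom_sequential_validation arr → Spec_sequential_validation arr (sequential_validation arr)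

-- ===== LEMMAS AND PROOFS =====
-- invariant: with the flag set, A's loop returns the first-True index of the suffix
-- (= first component of B's DP pair); with the flag clear, it returns the suffix answer
-- (= second component).
lemma pvSeqLoop_eq_back (l : List (String × Bool)) : ∀ i : Int,
    pvSeqLoop l i true = (pvBackLoop l i).1 ∧ pvSeqLoop l i false = (pvBackLoop l i).2 := by
  induction l with
  | nil => intro i; exact ⟨rfl, rfl⟩
  | cons hd tl ih =>
    intro i
    obtain ⟨s, c⟩ := hd
    obtain ⟨ih1, ih2⟩ := ih (i + 1)
    cases c <;> simp [pvSeqLoop, pvBackLoop, ih1, ih2]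

-- ===== VERDICT (by name: the statement is the Claim_ definition above) =====
theorem sequential_validation_spec : Claim_equal_sequential_validation := by
  intro arr _
  unfold Spec_sequential_validation sequential_validation sequential_validation_alt
  exact (pvSeqLoop_eq_back arr 0).2
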